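-- pv_equiv track=rewrite | github.com/ASSERT-KTH/Mokav | experiments/pynguin/c4b/return-lst/generated_tests/src_2557/3/src_2557.py | func
-- ===== SOURCE A (Python) =====
-- def func(*args):
-- 	ret_values = []
--
-- 	A = {'a', 'e', 'i', 'o', 'u', 'y', 'A', 'E', 'I', 'O', 'U', 'Y'}
-- 	a = args[0]
-- 	for i in range((len(a) - 1), (- 1), (- 1)):
-- 	    if ((ord('A') <= ord(a[i]) <= ord('Z')) or (ord('a') <= ord(a[i]) <= ord('z'))):
-- 	        if (a[i] in A):
-- 	            ret_values.append('YES')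
-- 	            break
-- 	        else:
-- 	            ret_values.append('NO')
-- 	            break
--
-- 	return ret_values
-- ===== SOURCE B (Python) =====
-- def func(*args):
--     a = args[0]
--     last = None
--     for c in a:
--         if ('A' <= c <= 'Z') or ('a' <= c <= 'z'):
--             last = c
--     ret_values = []
--     if last is not None:
--         vowels = {'a', 'e', 'i', 'o', 'u', 'y', 'A', 'E', 'I', 'O', 'U', 'Y'}
--         ret_values.append('YES' if last in vowels else 'NO')
--     return ret_values
-- ===== Notes on version B (the rewrite author's own statement) =====
-- stated objective: alternative
-- what changed: Replaces A's reverse index loop with early break by a single forward pass that keeps the most recent alphabetic character in an accumulator and branches on it once at the end.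
import Mathlib
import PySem

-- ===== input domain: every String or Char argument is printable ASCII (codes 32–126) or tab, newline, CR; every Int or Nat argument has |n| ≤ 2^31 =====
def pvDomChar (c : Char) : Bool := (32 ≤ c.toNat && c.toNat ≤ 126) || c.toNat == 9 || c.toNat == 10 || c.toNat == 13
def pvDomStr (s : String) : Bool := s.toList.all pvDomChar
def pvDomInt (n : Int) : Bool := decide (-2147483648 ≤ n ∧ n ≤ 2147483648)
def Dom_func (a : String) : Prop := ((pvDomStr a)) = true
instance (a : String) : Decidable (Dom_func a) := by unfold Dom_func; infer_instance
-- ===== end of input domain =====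

-- B replaces A's reverse early-exit index scan by one forward pass keeping the most
-- recent alphabetic character in an accumulator, branching once at the end
-- (alternative decomposition, same cost).

-- ===== PORT A =====
-- A's ord-range letter test
def pvIsLetter (c : Char) : Bool :=
  (('A').toNat ≤ c.toNat && c.toNat ≤ ('Z').toNat) || (('a').toNat ≤ c.toNat && c.toNat ≤ ('z').toNat)

-- membership test `a[i] in A` for the vowel set
def pvIsVowel (c : Char) : Bool :=
  c ∈ ['a', 'e', 'i', 'o', 'u', 'y', 'A', 'E', 'I', 'O', 'U', 'Y']

-- the for-loop of A: index i runs down from len-1 to 0, break = return the singleton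
def funcGo (cs : List Char) : Nat → List String
  | 0 =>
    let c := cs.getD 0 ' '   -- the index is always valid when called below
    if pvIsLetter c then
      (if pvIsVowel c then ["YES"] else ["NO"])
    else []                  -- loop falls through: range exhausted
  | j + 1 =>
    let c := cs.getD (j + 1) ' '
    if pvIsLetter c then
      (if pvIsVowel c then ["YES"] else ["NO"])
    else funcGo cs j

def func (a : String) : List String :=
  let cs := a.toList
  match cs.length with
  | 0 => []                 -- range(-1, -1, -1) is empty
  | n + 1 => funcGo cs n

-- ===== PORT B =====
-- B's letter test, written with character comparisons as in Source B
def altIsLetter (c : Char) : Bool :=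
  ('A' ≤ c && c ≤ 'Z') || ('a' ≤ c && c ≤ 'z')

def altIsVowel (c : Char) : Bool :=
  c ∈ ['a', 'e', 'i', 'o', 'u', 'y', 'A', 'E', 'I', 'O', 'U', 'Y']

-- the forward accumulator pass of Source B: `last` is None or the latest letter seen
def func_alt (a : String) : List String :=
  let last : Option Char :=
    a.toList.foldl (fun acc c => if altIsLetter c then some c else acc) none
  match last with
  | none => []
  | some c => [if altIsVowel c then "YES" else "NO"]

-- ===== PRECONDITION & SPEC =====
def Spec_func (a : String) (out : List String) : Prop := out = func_alt a
instance (a : String) (out : List String) : Decidable (Spec_func a out) := by unfold Spec_func; infer_instance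

-- ===== CLAIM (what is proved, stated in full; the proofs are below) =====
def Claim_equal_func : Prop := ∀ (a : String), Dom_func a → Spec_func a (func a)

-- ===== LEMMAS AND PROOFS =====

theorem altIsLetter_eq (c : Char) : altIsLetter c = pvIsLetter c := by
  simp only [altIsLetter, pvIsLetter]
  rcases c with ⟨v, hv⟩
  simp only [Char.le_def, UInt32.le_iff_toNat_le, Char.toNat]
  rfl

def pvLast (l : List Char) : Option Char :=
  l.foldl (fun acc c => if altIsLetter c then some c else acc) none

def pvRender (o : Option Char) : List String :=
  match o with
  | none => []
  | some c => [if altIsVowel c then "YES" else "NO"]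

theorem pvLast_append_one (l : List Char) (x : Char) :
    pvLast (l ++ [x]) = if altIsLetter x then some x else pvLast l := by
  simp [pvLast, List.foldl_append]

theorem funcGo_eq (cs : List Char) (i : Nat) (h : i < cs.length) :
    funcGo cs i = pvRender (pvLast (cs.take (i + 1))) := by
  induction i with
  | zero =>
    rw [funcGo.eq_def]
    simp only
    have ht : cs.take 1 = [cs.getD 0 ' '] := by
      cases cs with
      | nil => simp at h
      | cons x xs => simp
    rw [ht]
    simp only [pvLast, List.foldl, List.getD]
    rw [← altIsLetter_eq]
    cases hl : altIsLetter (cs[0]?.getD ' ')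
    · simp [pvRender]
    · simp only [if_true, pvRender, altIsVowel, pvIsVowel]
      split <;> rfl
  | succ j ih =>
    rw [funcGo.eq_def]
    simp only
    have htake : cs.take (j + 1 + 1) = cs.take (j + 1) ++ [cs.getD (j + 1) ' '] := by
      rw [List.take_add_one]
      simp [List.getD, List.getElem?_eq_getElem h]
    rw [htake, pvLast_append_one, ← altIsLetter_eq]
    by_cases hl : altIsLetter (cs.getD (j + 1) ' ')
    · simp only [List.getD] at hl ⊢
      simp only [hl, if_true, pvRender, altIsVowel, pvIsVowel]
      split <;> rfl
    · simp only [List.getD] at hl ⊢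
      simp only [hl, if_neg, Bool.false_eq_true, not_false_eq_true]
      exact ih (Nat.lt_of_succ_lt h)

-- ===== VERDICT (by name: the statement is the Claim_ definition above) =====
theorem func_spec : Claim_equal_func := by
  intro a _
  unfold Spec_func func func_alt
  cases hlen : a.toList.length with
  | zero =>
    have : a.toList = [] := List.length_eq_zero_iff.mp hlen
    simp [this]
  | succ n =>
    have h : n < a.toList.length := by omega
    simp only [hlen]
    rw [funcGo_eq a.toList n h]
    have ht : a.toList.take (n + 1) = a.toList := List.take_of_length_le (by omega)
    rw [ht]
    rfl
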